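-- pv_equiv track=rewrite | github.com/dongho108/breaking-codingtest | wooteco/exam/5.py | solution
-- ===== SOURCE A (Python) =====
-- def zero_check(answer):
--     for i in range(len(answer)):
--         if 0 in answer[i]:
--             return True
--     return False
--
-- def solution(rows, columns):
--     answer = [[0] * columns for _ in range(rows)]
--
--     now_x = 0
--     now_y = 0
--     now = 1
--     dir = 0  # 아래로 (x + 1)
--     dir_arr = [[-1] * columns for _ in range(rows)]
--     while zero_check(answer):
--         if answer[now_x][now_y] != 0 and dir == dir_arr[now_x][now_y]:
--             break
--         answer[now_x][now_y] = now
--         dir_arr[now_x][now_y] = dir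
--         if now % 2 == 0:
--             now_x = (now_x + 1) % rows
--             dir = 0
--         else:
--             now_y = (now_y + 1) % columns
--             dir = 1
--         now += 1
--
--     return answer
-- ===== SOURCE B (Python) =====
-- def solution(rows, columns):
--     # Positions are computed by closed formula per step; a dict of written
--     # cells and a running count of still-zero cells replace A's dir_arr grid
--     # and its full-grid rescan on every iteration.
--     answer = [[0] * columns for _ in range(rows)]
--     if rows <= 0 or columns <= 0:
--         return answer
--     written = {}           # (r, c) -> direction of the last write there
--     remaining = rows * columns
--     n = 1
--     while remaining > 0:
--         r = ((n - 1) // 2) % rows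
--         c = (n // 2) % columns
--         d = (n - 1) % 2
--         prev = written.get((r, c))
--         if prev is not None and prev == d:
--             break
--         if prev is None:
--             remaining -= 1
--         written[(r, c)] = d
--         answer[r][c] = n
--         n += 1
--     return answer
-- ===== Notes on version B (the rewrite author's own statement) =====
-- stated objective: alternative
-- what changed: B replaces A's per-step full-grid rescan (zero_check) and mutable cursor/dir_arr grid with a closed-form position formula per step, a dict of already-written cells and a running counter of remaining zero cells
import Mathlib
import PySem

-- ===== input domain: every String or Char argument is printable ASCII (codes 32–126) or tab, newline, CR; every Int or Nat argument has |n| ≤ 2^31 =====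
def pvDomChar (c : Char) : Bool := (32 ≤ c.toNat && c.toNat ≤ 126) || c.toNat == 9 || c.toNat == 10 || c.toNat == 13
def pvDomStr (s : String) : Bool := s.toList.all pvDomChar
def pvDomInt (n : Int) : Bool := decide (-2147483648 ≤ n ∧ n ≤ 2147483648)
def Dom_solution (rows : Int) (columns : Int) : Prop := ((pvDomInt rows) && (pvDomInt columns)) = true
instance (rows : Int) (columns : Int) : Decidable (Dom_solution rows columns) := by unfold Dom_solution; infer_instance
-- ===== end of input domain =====

-- B computes each step's cell by a closed formula and keeps a dict of written cells plus a
-- running count of remaining zero cells instead of A's per-step full-grid rescan (alternative).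


-- ===== PORT A =====
-- Both programs only ever index at positions the algorithm keeps in range
-- (Python would raise otherwise), so the total pyGetD/pySetD forms are exact here.
def pvGet2 (a : List (List Int)) (i j : Int) : Int :=
  PySem.List.pyGetD (PySem.List.pyGetD a i []) j 0

def pvSet2 (a : List (List Int)) (i j : Int) (v : Int) : List (List Int) :=
  PySem.List.pySetD a i (PySem.List.pySetD (PySem.List.pyGetD a i []) j v)

def zero_check (answer : List (List Int)) : Bool :=
  answer.any (fun row => row.contains 0)

-- the while loop of A; fuel bounds the iteration count (2*rows*columns+4 always suffices:
-- the loop breaks as soon as it revisits a cell with the direction recorded there)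
def pvLoopA (rows columns : Int) :
    Nat → List (List Int) → List (List Int) → Int → Int → Int → Int → List (List Int)
  | 0, answer, _, _, _, _, _ => answer
  | fuel + 1, answer, dirArr, nowX, nowY, now, dir =>
    if zero_check answer then
      if pvGet2 answer nowX nowY ≠ 0 ∧ dir = pvGet2 dirArr nowX nowY then answer
      else
        let answer' := pvSet2 answer nowX nowY now
        let dirArr' := pvSet2 dirArr nowX nowY dir
        if PySem.Int.mod now 2 = 0 then
          pvLoopA rows columns fuel answer' dirArr' (PySem.Int.mod (nowX + 1) rows) nowY (now + 1) 0
        else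
          pvLoopA rows columns fuel answer' dirArr' nowX (PySem.Int.mod (nowY + 1) columns) (now + 1) 1
    else answer

def solution (rows : Int) (columns : Int) : List (List Int) :=
  let answer := List.replicate rows.toNat (List.replicate columns.toNat (0 : Int))
  let dirArr := List.replicate rows.toNat (List.replicate columns.toNat (-1 : Int))
  pvLoopA rows columns (2 * rows * columns + 4).toNat answer dirArr 0 0 1 0

-- ===== PORT B =====
-- the while loop of B: positions by closed formula, dict of written cells, zero-cell counter
def pvLoopB (rows columns : Int) :
    Nat → List (List Int) → PySem.Dict (Int × Int) Int → Int → Int → List (List Int)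
  | 0, answer, _, _, _ => answer
  | fuel + 1, answer, written, remaining, n =>
    if remaining > 0 then
      let r := PySem.Int.mod (PySem.Int.floordiv (n - 1) 2) rows
      let c := PySem.Int.mod (PySem.Int.floordiv n 2) columns
      let d := PySem.Int.mod (n - 1) 2
      match written.get? (r, c) with
      | some prev =>
        if prev = d then answer
        else pvLoopB rows columns fuel (pvSet2 answer r c n) (written.insert (r, c) d) remaining (n + 1)
      | none =>
        pvLoopB rows columns fuel (pvSet2 answer r c n) (written.insert (r, c) d) (remaining - 1) (n + 1)
    else answer

def solution_alt (rows : Int) (columns : Int) : List (List Int) :=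
  let answer := List.replicate rows.toNat (List.replicate columns.toNat (0 : Int))
  if rows ≤ 0 ∨ columns ≤ 0 then answer
  else pvLoopB rows columns (2 * rows * columns + 4).toNat answer PySem.Dict.empty (rows * columns) 1

-- ===== PRECONDITION & SPEC =====
def Spec_solution (rows : Int) (columns : Int) (out : List (List Int)) : Prop := out = solution_alt rows columns
instance (rows : Int) (columns : Int) (out : List (List Int)) : Decidable (Spec_solution rows columns out) := by unfold Spec_solution; infer_instance

-- ===== CLAIM (what is proved, stated in full; the proofs are below) =====
def Claim_equal_solution : Prop := ∀ (rows : Int) (columns : Int), Dom_solution rows columns → Spec_solution rows columns (solution rows columns)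

-- ===== LEMMAS AND PROOFS =====

theorem pd2 : (0:Int) < 2 := by norm_num

-- proof-side abbreviations: position and direction of step n, grid shape, number of zero cells
def pvPosX (rows n : Int) : Int := PySem.Int.mod (PySem.Int.floordiv (n - 1) 2) rows
def pvPosY (cols n : Int) : Int := PySem.Int.mod (PySem.Int.floordiv n 2) cols
def pvDir (n : Int) : Int := PySem.Int.mod (n - 1) 2

def pvShaped (R C : Nat) (a : List (List Int)) : Prop :=
  a.length = R ∧ ∀ row ∈ a, row.length = C

def pvCountZeros (a : List (List Int)) : Nat := (a.map (fun row => row.count 0)).sum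

lemma zero_check_eq_false_iff (a : List (List Int)) :
    zero_check a = false ↔ pvCountZeros a = 0 := by
  simp [zero_check, pvCountZeros, List.any_eq_false, List.sum_eq_zero_iff, List.count_eq_zero]

lemma pvGet2_eq_getElem (a : List (List Int)) (R C : Nat) (i j : Int)
    (hs : pvShaped R C a) (hi0 : 0 ≤ i) (hiR : i < (R : Int)) (hj0 : 0 ≤ j) (hjC : j < (C : Int)) :
    ∃ (hi : i.toNat < a.length) (hj : j.toNat < (a[i.toNat]).length),
      pvGet2 a i j = a[i.toNat][j.toNat] := by
  obtain ⟨hlen, hrow⟩ := hs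
  have hi : i.toNat < a.length := by omega
  have hj : j.toNat < (a[i.toNat]).length := by
    rw [hrow _ (a.getElem_mem hi)]; omega
  refine ⟨hi, hj, ?_⟩
  rw [pvGet2, PySem.List.pyGetD_eq_getElem a [] hi0 (by omega),
      PySem.List.pyGetD_eq_getElem _ 0 hj0 (by omega)]

lemma pvSet2_eq_set (a : List (List Int)) (R C : Nat) (i j : Int) (v : Int)
    (hs : pvShaped R C a) (hi0 : 0 ≤ i) (hiR : i < (R : Int)) (hj0 : 0 ≤ j) (hjC : j < (C : Int)) :
    ∃ (hi : i.toNat < a.length),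
      pvSet2 a i j v = a.set i.toNat (a[i.toNat].set j.toNat v) := by
  obtain ⟨hlen, hrow⟩ := hs
  have hi : i.toNat < a.length := by omega
  refine ⟨hi, ?_⟩
  rw [pvSet2, PySem.List.pyGetD_eq_getElem a [] hi0 (by omega),
      PySem.List.pySetD_of_nonneg _ _ hj0, PySem.List.pySetD_of_nonneg _ _ hi0]

lemma pvShaped_set2 (a : List (List Int)) (R C : Nat) (i j : Int) (v : Int)
    (hs : pvShaped R C a) (hi0 : 0 ≤ i) (hiR : i < (R : Int)) (hj0 : 0 ≤ j) (hjC : j < (C : Int)) :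
    pvShaped R C (pvSet2 a i j v) := by
  obtain ⟨hi, heq⟩ := pvSet2_eq_set a R C i j v hs hi0 hiR hj0 hjC
  obtain ⟨hlen, hrow⟩ := hs
  rw [heq]
  refine ⟨by simpa using hlen, ?_⟩
  intro row hmem
  rcases List.mem_or_eq_of_mem_set hmem with h | h
  · exact hrow _ h
  · rw [h, List.length_set]; exact hrow _ (a.getElem_mem hi)

lemma pvGet2_set2_self (a : List (List Int)) (R C : Nat) (i j : Int) (v : Int)
    (hs : pvShaped R C a) (hi0 : 0 ≤ i) (hiR : i < (R : Int)) (hj0 : 0 ≤ j) (hjC : j < (C : Int)) :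
    pvGet2 (pvSet2 a i j v) i j = v := by
  obtain ⟨hi, heq⟩ := pvSet2_eq_set a R C i j v hs hi0 hiR hj0 hjC
  obtain ⟨hi', hj', hg⟩ := pvGet2_eq_getElem (pvSet2 a i j v) R C i j
    (pvShaped_set2 a R C i j v hs hi0 hiR hj0 hjC) hi0 hiR hj0 hjC
  rw [hg]
  simp only [heq] at hi' hj' ⊢
  simp

lemma pvGet2_set2_ne (a : List (List Int)) (R C : Nat) (i j i' j' : Int) (v : Int)
    (hs : pvShaped R C a) (hi0 : 0 ≤ i) (hiR : i < (R : Int)) (hj0 : 0 ≤ j) (hjC : j < (C : Int))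
    (hi0' : 0 ≤ i') (hiR' : i' < (R : Int)) (hj0' : 0 ≤ j') (hjC' : j' < (C : Int))
    (hne : ¬ (i' = i ∧ j' = j)) :
    pvGet2 (pvSet2 a i j v) i' j' = pvGet2 a i' j' := by
  obtain ⟨hi, heq⟩ := pvSet2_eq_set a R C i j v hs hi0 hiR hj0 hjC
  obtain ⟨hia, hja, hga⟩ := pvGet2_eq_getElem a R C i' j' hs hi0' hiR' hj0' hjC'
  obtain ⟨hib, hjb, hgb⟩ := pvGet2_eq_getElem (pvSet2 a i j v) R C i' j'
    (pvShaped_set2 a R C i j v hs hi0 hiR hj0 hjC) hi0' hiR' hj0' hjC'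
  rw [hga, hgb]
  simp only [heq] at hib hjb ⊢
  by_cases hii : i'.toNat = i.toNat
  · have hji : j'.toNat ≠ j.toNat := by omega
    have hieq : i' = i := by omega
    simp [List.getElem_set, hieq]
    exact fun h => absurd h.symm hji
  · have : i.toNat ≠ i'.toNat := by omega
    simp [this]

lemma sum_map_set (f : List Int → Nat) (l : List (List Int)) :
    ∀ (n : Nat) (x : List Int) (h : n < l.length),
    ((l.set n x).map f).sum + f (l[n]'h) = (l.map f).sum + f x := by
  induction l with
  | nil => intro n x h; simp at h
  | cons y ys ih =>
    intro n x h
    cases n with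
    | zero => simp; omega
    | succ m =>
      simp only [List.set_cons_succ, List.map_cons, List.sum_cons, List.getElem_cons_succ]
      have := ih m x (by simpa using h)
      omega

lemma count_set_zero (row : List Int) : ∀ (n : Nat) (v : Int) (h : n < row.length),
    (row.set n v).count 0 + (if row[n]'h = 0 then 1 else 0)
      = row.count 0 + (if v = 0 then 1 else 0) := by
  induction row with
  | nil => intro n v h; simp at h
  | cons y ys ih =>
    intro n v h
    cases n with
    | zero =>
      simp only [List.set_cons_zero, List.getElem_cons_zero, List.count_cons, beq_iff_eq]
      split_ifs <;> omega
    | succ m =>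
      simp only [List.set_cons_succ, List.getElem_cons_succ, List.count_cons, beq_iff_eq]
      have := ih m v (by simpa using h)
      split_ifs at this ⊢ <;> omega

lemma pvCountZeros_set2 (a : List (List Int)) (R C : Nat) (i j : Int) (v : Int)
    (hs : pvShaped R C a) (hi0 : 0 ≤ i) (hiR : i < (R : Int)) (hj0 : 0 ≤ j) (hjC : j < (C : Int))
    (hv : v ≠ 0) :
    pvCountZeros (pvSet2 a i j v) + (if pvGet2 a i j = 0 then 1 else 0) = pvCountZeros a := by
  obtain ⟨hi, heq⟩ := pvSet2_eq_set a R C i j v hs hi0 hiR hj0 hjC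
  obtain ⟨hi', hj', hg⟩ := pvGet2_eq_getElem a R C i j hs hi0 hiR hj0 hjC
  have h1 := sum_map_set (fun row => row.count 0) a i.toNat (a[i.toNat].set j.toNat v) hi
  have h2 := count_set_zero (a[i.toNat]) j.toNat v hj'
  rw [hg]
  rw [pvCountZeros, heq]
  simp only [pvCountZeros] at h1 ⊢
  simp only [hv, if_false] at h2
  split_ifs at h2 ⊢ <;> omega

-- position-step arithmetic
lemma pvPosX_succ_even (rows n : Int) (hr : 0 < rows) (he : PySem.Int.mod n 2 = 0) :
    PySem.Int.mod (pvPosX rows n + 1) rows = pvPosX rows (n + 1) := by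
  rw [PySem.Int.mod_eq_emod_of_pos pd2] at he
  rw [pvPosX, pvPosX, PySem.Int.floordiv_eq_ediv_of_pos pd2, PySem.Int.floordiv_eq_ediv_of_pos pd2,
      PySem.Int.mod_eq_emod_of_pos hr, PySem.Int.mod_eq_emod_of_pos hr,
      PySem.Int.mod_eq_emod_of_pos hr, Int.emod_add_emod]
  congr 1
  omega

lemma pvPosY_succ_even (cols n : Int) (he : PySem.Int.mod n 2 = 0) :
    pvPosY cols n = pvPosY cols (n + 1) := by
  rw [PySem.Int.mod_eq_emod_of_pos pd2] at he
  rw [pvPosY, pvPosY, PySem.Int.floordiv_eq_ediv_of_pos pd2, PySem.Int.floordiv_eq_ediv_of_pos pd2]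
  have h : n / 2 = (n + 1) / 2 := by omega
  rw [h]

lemma pvPosX_succ_odd (rows n : Int) (he : PySem.Int.mod n 2 ≠ 0) :
    pvPosX rows n = pvPosX rows (n + 1) := by
  rw [PySem.Int.mod_eq_emod_of_pos pd2] at he
  rw [pvPosX, pvPosX, PySem.Int.floordiv_eq_ediv_of_pos pd2, PySem.Int.floordiv_eq_ediv_of_pos pd2]
  have h : (n - 1) / 2 = (n + 1 - 1) / 2 := by omega
  rw [h]

lemma pvPosY_succ_odd (cols n : Int) (hc : 0 < cols) (he : PySem.Int.mod n 2 ≠ 0) :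
    PySem.Int.mod (pvPosY cols n + 1) cols = pvPosY cols (n + 1) := by
  rw [PySem.Int.mod_eq_emod_of_pos pd2] at he
  rw [pvPosY, pvPosY, PySem.Int.floordiv_eq_ediv_of_pos pd2, PySem.Int.floordiv_eq_ediv_of_pos pd2,
      PySem.Int.mod_eq_emod_of_pos hc, PySem.Int.mod_eq_emod_of_pos hc,
      PySem.Int.mod_eq_emod_of_pos hc, Int.emod_add_emod]
  congr 1
  omega

lemma pvDir_succ_even (n : Int) (he : PySem.Int.mod n 2 = 0) : pvDir (n + 1) = 0 := by
  rw [PySem.Int.mod_eq_emod_of_pos pd2] at he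
  rw [pvDir, PySem.Int.mod_eq_emod_of_pos pd2]
  omega

lemma pvDir_succ_odd (n : Int) (he : PySem.Int.mod n 2 ≠ 0) : pvDir (n + 1) = 1 := by
  rw [pvDir, PySem.Int.mod_eq_emod_of_pos pd2]
  rw [PySem.Int.mod_eq_emod_of_pos pd2] at he
  omega

lemma pvDir_nonneg (n : Int) : 0 ≤ pvDir n := PySem.Int.mod_nonneg _ pd2

-- the main correspondence between the two loops
lemma pvLoop_eq (rows cols : Int) (hr : 0 < rows) (hc : 0 < cols) :
    ∀ (fuel : Nat) (answer dirArr : List (List Int)) (written : PySem.Dict (Int × Int) Int) (now : Int),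
    pvShaped rows.toNat cols.toNat answer →
    pvShaped rows.toNat cols.toNat dirArr →
    (∀ i j : Int, 0 ≤ i → i < rows → 0 ≤ j → j < cols →
      written.get? (i, j) = (if pvGet2 dirArr i j = -1 then none else some (pvGet2 dirArr i j)) ∧
      (pvGet2 answer i j = 0 ↔ pvGet2 dirArr i j = -1)) →
    1 ≤ now →
    pvLoopA rows cols fuel answer dirArr (pvPosX rows now) (pvPosY cols now) now (pvDir now) =
      pvLoopB rows cols fuel answer written ((pvCountZeros answer : Int)) now := by
  intro fuel
  have hRr : ((rows.toNat : Int)) = rows := Int.toNat_of_nonneg hr.le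
  have hCc : ((cols.toNat : Int)) = cols := Int.toNat_of_nonneg hc.le
  induction fuel with
  | zero => intro answer dirArr written now _ _ _ _; simp [pvLoopA, pvLoopB]
  | succ f ih =>
    intro answer dirArr written now hsa hsd hinv hn
    have hr0 : 0 ≤ pvPosX rows now := PySem.Int.mod_nonneg _ hr
    have hrR : pvPosX rows now < rows := PySem.Int.mod_lt _ hr
    have hc0 : 0 ≤ pvPosY cols now := PySem.Int.mod_nonneg _ hc
    have hcC : pvPosY cols now < cols := PySem.Int.mod_lt _ hc
    have hd0 : 0 ≤ pvDir now := pvDir_nonneg now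
    obtain ⟨hdict, hiff⟩ := hinv (pvPosX rows now) (pvPosY cols now) hr0 hrR hc0 hcC
    simp only [pvLoopA, pvLoopB]
    by_cases hcz : pvCountZeros answer = 0
    · have hz : zero_check answer = false := (zero_check_eq_false_iff _).2 hcz
      simp [hz, hcz]
    · have hz : zero_check answer = true := by
        cases h : zero_check answer
        · exact absurd ((zero_check_eq_false_iff _).1 h) hcz
        · rfl
      have hpos : (0 : Int) < (pvCountZeros answer : Int) := by
        exact_mod_cast Nat.pos_of_ne_zero hcz
      rw [hz, if_pos rfl, if_pos hpos]
      -- the set-up for the recursive case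
      have hstep : ∀ (written' : PySem.Dict (Int × Int) Int) (rem' : Int),
          (∀ i j : Int, 0 ≤ i → i < rows → 0 ≤ j → j < cols →
            written'.get? (i, j) =
              (if pvGet2 (pvSet2 dirArr (pvPosX rows now) (pvPosY cols now) (pvDir now)) i j = -1
               then none
               else some (pvGet2 (pvSet2 dirArr (pvPosX rows now) (pvPosY cols now) (pvDir now)) i j)) ∧
            (pvGet2 (pvSet2 answer (pvPosX rows now) (pvPosY cols now) now) i j = 0 ↔
              pvGet2 (pvSet2 dirArr (pvPosX rows now) (pvPosY cols now) (pvDir now)) i j = -1)) →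
          rem' = ((pvCountZeros (pvSet2 answer (pvPosX rows now) (pvPosY cols now) now) : Int)) →
          (if PySem.Int.mod now 2 = 0 then
            pvLoopA rows cols f (pvSet2 answer (pvPosX rows now) (pvPosY cols now) now)
              (pvSet2 dirArr (pvPosX rows now) (pvPosY cols now) (pvDir now))
              (PySem.Int.mod (pvPosX rows now + 1) rows) (pvPosY cols now) (now + 1) 0
          else
            pvLoopA rows cols f (pvSet2 answer (pvPosX rows now) (pvPosY cols now) now)
              (pvSet2 dirArr (pvPosX rows now) (pvPosY cols now) (pvDir now))
              (pvPosX rows now) (PySem.Int.mod (pvPosY cols now + 1) cols) (now + 1) 1) =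
          pvLoopB rows cols f (pvSet2 answer (pvPosX rows now) (pvPosY cols now) now) written' rem' (now + 1) := by
        intro written' rem' hinv' hrem'
        have hsa' := pvShaped_set2 answer rows.toNat cols.toNat _ _ now hsa hr0 (by omega) hc0 (by omega)
        have hsd' := pvShaped_set2 dirArr rows.toNat cols.toNat _ _ (pvDir now) hsd hr0 (by omega) hc0 (by omega)
        have hmain := ih (pvSet2 answer (pvPosX rows now) (pvPosY cols now) now)
          (pvSet2 dirArr (pvPosX rows now) (pvPosY cols now) (pvDir now)) written' (now + 1)
          hsa' hsd' hinv' (by omega)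
        rw [hrem']
        by_cases hpar : PySem.Int.mod now 2 = 0
        · rw [if_pos hpar]
          rw [← pvPosX_succ_even rows now hr hpar, ← pvPosY_succ_even cols now hpar,
              pvDir_succ_even now hpar] at hmain
          exact hmain
        · rw [if_neg hpar]
          rw [← pvPosY_succ_odd cols now hc hpar, ← pvPosX_succ_odd rows now hpar,
              pvDir_succ_odd now hpar] at hmain
          exact hmain
      -- fold B's inline position expressions into the pvPos names
      have e1 : PySem.Int.mod (PySem.Int.floordiv (now - 1) 2) rows = pvPosX rows now := rfl
      have e2 : PySem.Int.mod (PySem.Int.floordiv now 2) cols = pvPosY cols now := rfl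
      have e3 : PySem.Int.mod (now - 1) 2 = pvDir now := rfl
      rw [e1, e2, e3]
      -- the updated dict invariant (shared by both recursive cases)
      have hinv' : ∀ i j : Int, 0 ≤ i → i < rows → 0 ≤ j → j < cols →
          (written.insert (pvPosX rows now, pvPosY cols now) (pvDir now)).get? (i, j) =
            (if pvGet2 (pvSet2 dirArr (pvPosX rows now) (pvPosY cols now) (pvDir now)) i j = -1
             then none
             else some (pvGet2 (pvSet2 dirArr (pvPosX rows now) (pvPosY cols now) (pvDir now)) i j)) ∧
          (pvGet2 (pvSet2 answer (pvPosX rows now) (pvPosY cols now) now) i j = 0 ↔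
            pvGet2 (pvSet2 dirArr (pvPosX rows now) (pvPosY cols now) (pvDir now)) i j = -1) := by
        intro i j hi0 hiR hj0 hjC
        obtain ⟨hd, hf⟩ := hinv i j hi0 hiR hj0 hjC
        by_cases hkey : (i, j) = (pvPosX rows now, pvPosY cols now)
        · have hieq : i = pvPosX rows now := (Prod.mk.injEq _ _ _ _ ▸ hkey).1
          have hjeq : j = pvPosY cols now := congrArg Prod.snd hkey
          rw [PySem.Dict.get?_insert, if_pos hkey, hieq, hjeq]
          rw [pvGet2_set2_self dirArr rows.toNat cols.toNat _ _ _ hsd hr0 (by omega) hc0 (by omega)]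
          rw [pvGet2_set2_self answer rows.toNat cols.toNat _ _ _ hsa hr0 (by omega) hc0 (by omega)]
          constructor
          · rw [if_neg (by omega)]
          · constructor
            · intro h; omega
            · intro h; omega
        · have hne : ¬ (i = pvPosX rows now ∧ j = pvPosY cols now) := by
            intro ⟨h1, h2⟩; exact hkey (by rw [h1, h2])
          rw [PySem.Dict.get?_insert, if_neg hkey]
          rw [pvGet2_set2_ne dirArr rows.toNat cols.toNat _ _ _ _ _ hsd hr0 (by omega) hc0 (by omega)
                hi0 (by omega) hj0 (by omega) hne]
          rw [pvGet2_set2_ne answer rows.toNat cols.toNat _ _ _ _ _ hsa hr0 (by omega) hc0 (by omega)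
                hi0 (by omega) hj0 (by omega) hne]
          exact ⟨hd, hf⟩
      by_cases hcell : pvGet2 dirArr (pvPosX rows now) (pvPosY cols now) = -1
      · -- unwritten cell: A's break test is false, B sees `none` and decrements the counter
        have hzc : pvGet2 answer (pvPosX rows now) (pvPosY cols now) = 0 := hiff.2 hcell
        rw [hdict, if_pos hcell]
        rw [if_neg (by simp [hzc])]
        have hcnt := pvCountZeros_set2 answer rows.toNat cols.toNat _ _ now hsa hr0 (by omega) hc0
          (by omega) (by omega)
        rw [if_pos hzc] at hcnt
        exact hstep _ _ hinv' (by push_cast [← hcnt]; ring)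
      · -- written cell: B sees `some prev`; both break exactly when the stored direction matches
        have hnz : pvGet2 answer (pvPosX rows now) (pvPosY cols now) ≠ 0 := fun h => hcell (hiff.1 h)
        rw [hdict, if_neg hcell]
        by_cases hbrk : pvGet2 dirArr (pvPosX rows now) (pvPosY cols now) = pvDir now
        · rw [if_pos ⟨hnz, hbrk.symm⟩]
          simp [hbrk]
        · rw [if_neg (fun h => hbrk h.2.symm)]
          have hcnt := pvCountZeros_set2 answer rows.toNat cols.toNat _ _ now hsa hr0 (by omega) hc0
            (by omega) (by omega)
          rw [if_neg hnz] at hcnt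
          have := hstep _ ((pvCountZeros answer : Int)) hinv' (by rw [← hcnt]; push_cast; ring)
          simp only [hbrk, if_false]
          exact this

lemma pvLoopA_stop (rows cols : Int) (fuel : Nat) (a d : List (List Int)) (x y n dir : Int)
    (hz : zero_check a = false) : pvLoopA rows cols fuel a d x y n dir = a := by
  cases fuel <;> simp [pvLoopA, hz]

lemma zero_check_degenerate (rows cols : Int) (h : rows ≤ 0 ∨ cols ≤ 0) :
    zero_check (List.replicate rows.toNat (List.replicate cols.toNat (0 : Int))) = false := by
  rcases h with h | h
  · have : rows.toNat = 0 := by omega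
    simp [this, zero_check]
  · have : cols.toNat = 0 := by omega
    simp [this, zero_check]

lemma pvShaped_replicate (R C : Nat) (v : Int) :
    pvShaped R C (List.replicate R (List.replicate C v)) := by
  refine ⟨by simp, ?_⟩
  intro row h
  rw [List.eq_of_mem_replicate h]
  simp

lemma pvGet2_replicate (R C : Nat) (v : Int) (i j : Int)
    (hi0 : 0 ≤ i) (hiR : i < (R : Int)) (hj0 : 0 ≤ j) (hjC : j < (C : Int)) :
    pvGet2 (List.replicate R (List.replicate C v)) i j = v := by
  obtain ⟨hi, hj, hg⟩ := pvGet2_eq_getElem (List.replicate R (List.replicate C v)) R C i j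
    (pvShaped_replicate R C v) hi0 hiR hj0 hjC
  rw [hg]
  simp

lemma pvCountZeros_replicate (R C : Nat) :
    pvCountZeros (List.replicate R (List.replicate C (0 : Int))) = R * C := by
  simp [pvCountZeros, List.map_replicate, List.sum_replicate, smul_eq_mul]

-- ===== VERDICT (by name: the statement is the Claim_ definition above) =====
theorem solution_spec : Claim_equal_solution := by
  unfold Claim_equal_solution Spec_solution
  intro rows cols _
  simp only [solution, solution_alt]
  by_cases h : rows ≤ 0 ∨ cols ≤ 0
  · rw [if_pos h, pvLoopA_stop _ _ _ _ _ _ _ _ _ (zero_check_degenerate rows cols h)]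
  · have hr : 0 < rows := by omega
    have hc : 0 < cols := by omega
    rw [if_neg (by omega)]
    have hinv : ∀ i j : Int, 0 ≤ i → i < rows → 0 ≤ j → j < cols →
        (PySem.Dict.empty : PySem.Dict (Int × Int) Int).get? (i, j) =
          (if pvGet2 (List.replicate rows.toNat (List.replicate cols.toNat (-1 : Int))) i j = -1
           then none
           else some (pvGet2 (List.replicate rows.toNat (List.replicate cols.toNat (-1 : Int))) i j)) ∧
        (pvGet2 (List.replicate rows.toNat (List.replicate cols.toNat (0 : Int))) i j = 0 ↔
          pvGet2 (List.replicate rows.toNat (List.replicate cols.toNat (-1 : Int))) i j = -1) := by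
      intro i j hi0 hiR hj0 hjC
      have hR : (rows.toNat : Int) = rows := Int.toNat_of_nonneg hr.le
      have hC : (cols.toNat : Int) = cols := Int.toNat_of_nonneg hc.le
      rw [pvGet2_replicate rows.toNat cols.toNat (-1) i j hi0 (by omega) hj0 (by omega),
          pvGet2_replicate rows.toNat cols.toNat 0 i j hi0 (by omega) hj0 (by omega)]
      simp [PySem.Dict.get?_empty]
    have H := pvLoop_eq rows cols hr hc (2 * rows * cols + 4).toNat
      (List.replicate rows.toNat (List.replicate cols.toNat (0 : Int)))
      (List.replicate rows.toNat (List.replicate cols.toNat (-1 : Int)))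
      PySem.Dict.empty 1
      (pvShaped_replicate rows.toNat cols.toNat 0)
      (pvShaped_replicate rows.toNat cols.toNat (-1))
      hinv (le_refl 1)
    have hx : pvPosX rows 1 = 0 := by
      rw [pvPosX, PySem.Int.floordiv_eq_ediv_of_pos pd2, PySem.Int.mod_eq_emod_of_pos hr]
      norm_num
    have hy : pvPosY cols 1 = 0 := by
      rw [pvPosY, PySem.Int.floordiv_eq_ediv_of_pos pd2, PySem.Int.mod_eq_emod_of_pos hc]
      norm_num
    have hd : pvDir 1 = 0 := by
      rw [pvDir, PySem.Int.mod_eq_emod_of_pos pd2]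
      norm_num
    have hcz : ((pvCountZeros (List.replicate rows.toNat (List.replicate cols.toNat (0 : Int))) : Int))
        = rows * cols := by
      rw [pvCountZeros_replicate]
      push_cast
      rw [Int.toNat_of_nonneg hr.le, Int.toNat_of_nonneg hc.le]
    rw [hx, hy, hd, hcz] at H
    exact H
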